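-- pv_equiv track=rewrite | github.com/cytoly/data_structures | problems/matrixElementsSum.py | matrixElementsSum
-- ===== SOURCE A (Python) =====
-- def matrixElementsSum(matrix):
--     sum = 0
--     for i in range(len(matrix)):
--         for j in range(len(matrix[0])):
--             if matrix[i][j] == 0 and i+1 < len(matrix):
--                 matrix[i+1][j] = 0
--             sum += matrix[i][j]
--     return sum
-- ===== SOURCE B (Python) =====
-- def matrixElementsSum(matrix):
--     # Column-major: zip(*matrix) yields the columns; in each column, add entries
--     # top-down and stop at the first zero (everything below contributes 0 in A).
--     # Unlike A, this does not mutate `matrix` (equivalence is about the return value).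
--     total = 0
--     for col in zip(*matrix):
--         for v in col:
--             total += v
--             if v == 0:
--                 break
--     return total
-- ===== Notes on version B (the rewrite author's own statement) =====
-- stated objective: alternative
-- what changed: B traverses the matrix column-major via zip(*matrix) and, per column, sums entries top-down stopping at the first zero, replacing A's row-major double loop that propagates zeros one row down by mutating the matrix; B does not mutate its argument (equivalence is about the return value).
import Mathlib
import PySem

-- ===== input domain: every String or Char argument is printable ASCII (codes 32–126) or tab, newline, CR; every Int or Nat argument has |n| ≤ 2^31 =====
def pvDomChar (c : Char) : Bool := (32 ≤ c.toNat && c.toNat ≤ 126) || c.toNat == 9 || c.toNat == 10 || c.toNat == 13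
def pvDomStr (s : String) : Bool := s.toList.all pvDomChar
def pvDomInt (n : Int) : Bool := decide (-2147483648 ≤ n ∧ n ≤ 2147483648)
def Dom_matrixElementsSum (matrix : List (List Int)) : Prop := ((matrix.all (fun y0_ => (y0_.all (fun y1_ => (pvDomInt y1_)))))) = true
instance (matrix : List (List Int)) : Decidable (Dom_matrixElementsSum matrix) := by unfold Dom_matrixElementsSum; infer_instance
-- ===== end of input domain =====

-- B sums each column top-down stopping at the first zero (column-major, no mutation of
-- the argument; the equivalence proved is about the RETURN value only — A zeroes cells
-- below a zero in place, B leaves the matrix untouched).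

-- ===== PORT A =====
-- A's inner loop body: reads matrix[i][j]; if it is 0 and i+1 < len(matrix),
-- writes matrix[i+1][j] = 0; adds the read value to the sum.
def aInner (n i : Nat) (st : List (List Int) × Int) (j : Nat) : List (List Int) × Int :=
  let m := st.1
  let v := (m.getD i []).getD j 0          -- matrix[i][j]; indices in range under Pre_
  let m' := if v = 0 ∧ i + 1 < n then m.set (i+1) ((m.getD (i+1) []).set j 0) else m
  (m', st.2 + v)

-- one outer iteration: for j in range(len(matrix[0])).  Python re-reads len(matrix)
-- and len(matrix[0]) each time, but the mutation (set) never changes any length, so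
-- the snapshots n, w taken below are exact; on the empty matrix Python never
-- evaluates matrix[0] and w := 0 makes the (never run) inner loop empty as well.
def aOuter (n w : Nat) (st : List (List Int) × Int) (i : Nat) : List (List Int) × Int :=
  (List.range w).foldl (aInner n i) st

def matrixElementsSum (matrix : List (List Int)) : Int :=
  ((List.range matrix.length).foldl
      (aOuter matrix.length (matrix.headD []).length) (matrix, 0)).2

-- ===== PORT B =====
-- inner 'for v in col: total += v; if v == 0: break'  (the break leaves the 0 added)
def bSumCol : List Int → Int
  | [] => 0
  | v :: rest => if v = 0 then v else v + bSumCol rest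

-- zip(*matrix): the columns, truncated to the shortest row (zip stops at the
-- shortest iterable; r.getD is exact because j < every row's length).
def bCols (matrix : List (List Int)) : List (List Int) :=
  match matrix with
  | [] => []
  | r0 :: rest =>
    let minLen := rest.foldl (fun a r => min a r.length) r0.length
    (List.range minLen).map (fun j => matrix.map (fun r => r.getD j 0))

def matrixElementsSum_alt (matrix : List (List Int)) : Int :=
  (bCols matrix).foldl (fun s c => s + bSumCol c) 0

-- ===== PRECONDITION & SPEC =====
-- Pre_ excludes exactly the inputs where A raises IndexError: some row shorter than
-- the first row (A reads matrix[i][j] for every j < len(matrix[0])).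
def Pre_matrixElementsSum (matrix : List (List Int)) : Prop :=
  ∀ r ∈ matrix, (matrix.headD []).length ≤ r.length

instance (matrix : List (List Int)) : Decidable (Pre_matrixElementsSum matrix) := by
  unfold Pre_matrixElementsSum; infer_instance

def pvWitness_matrixElementsSum : List (List Int) := [[1, 0, 2], [3, 4, 5], [6, 7, 8]]

def Spec_matrixElementsSum (matrix : List (List Int)) (out : Int) : Prop := out = matrixElementsSum_alt matrix
instance (matrix : List (List Int)) (out : Int) : Decidable (Spec_matrixElementsSum matrix out) := by unfold Spec_matrixElementsSum; infer_instance

-- ===== CLAIM (what is proved, stated in full; the proofs are below) =====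
def Claim_equal_matrixElementsSum : Prop := ∀ (matrix : List (List Int)), Dom_matrixElementsSum matrix → Pre_matrixElementsSum matrix → Spec_matrixElementsSum matrix (matrixElementsSum matrix)

-- ===== LEMMAS AND PROOFS =====

-- finite sum Σ_{j<k} f j, as a recursion matching the foldl shape of the ports
def SS (f : Nat → Int) : Nat → Int
  | 0 => 0
  | k + 1 => SS f k + f k

-- the row i+1 of A's matrix after the first k inner-loop steps of processing row i:
-- y with position j zeroed for every j < k where x[j] = 0
def maskN (x y : List Int) : Nat → List Int
  | 0 => y
  | k + 1 => if x.getD k 0 = 0 then (maskN x y k).set k 0 else maskN x y k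

-- the values A actually reads in row i (original row, masked by the row above)
def rowA (matrix : List (List Int)) (w : Nat) : Nat → List Int
  | 0 => matrix.getD 0 []
  | i + 1 => maskN (rowA matrix w i) (matrix.getD (i+1) []) w

-- A's matrix just before processing row i (rows ≤ i already masked)
def MM (matrix : List (List Int)) (w n i : Nat) : List (List Int) :=
  (List.range n).map (fun k' => if k' ≤ i then rowA matrix w k' else matrix.getD k' [])

-- A's matrix during processing of row i, after k inner steps
def Mpart (matrix : List (List Int)) (w n i k : Nat) : List (List Int) :=
  (List.range n).map (fun k' =>
    if k' ≤ i then rowA matrix w k'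
    else if k' = i + 1 then maskN (rowA matrix w i) (matrix.getD (i+1) []) k
    else matrix.getD k' [])

-- the value A's pass leaves readable at (i, j): 0 once the column has hit a zero
def colRead (c : List Int) : Nat → Int
  | 0 => c.getD 0 0
  | i + 1 => if colRead c i = 0 then 0 else c.getD (i+1) 0

lemma SS_congr (f g : Nat → Int) (k : Nat) (h : ∀ i, i < k → f i = g i) :
    SS f k = SS g k := by
  induction k with
  | zero => rfl
  | succ k ih => simp [SS, ih (fun i hi => h i (by omega)), h k (by omega)]

lemma SS_add (f g : Nat → Int) (k : Nat) :
    SS (fun j => f j + g j) k = SS f k + SS g k := by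
  induction k with
  | zero => rfl
  | succ k ih => simp [SS, ih]; ring

lemma SS_zero (k : Nat) : SS (fun _ => (0 : Int)) k = 0 := by
  induction k with
  | zero => rfl
  | succ k ih => simp [SS, ih]

lemma SS_swap (f : Nat → Nat → Int) (n w : Nat) :
    SS (fun i => SS (fun j => f i j) w) n = SS (fun j => SS (fun i => f i j) n) w := by
  induction n with
  | zero =>
    show (0 : Int) = SS (fun j => SS (fun i => f i j) 0) w
    exact (SS_zero w).symm
  | succ n ih =>
    show SS (fun i => SS (fun j => f i j) w) n + SS (fun j => f n j) w
        = SS (fun j => SS (fun i => f i j) n + f n j) w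
    rw [SS_add, ih]

lemma SS_shift (f : Nat → Int) (k : Nat) :
    SS f (k + 1) = f 0 + SS (fun i => f (i + 1)) k := by
  induction k with
  | zero => simp [SS]
  | succ k ih =>
    show SS f (k + 1) + f (k + 1) = f 0 + (SS (fun i => f (i + 1)) k + f (k + 1))
    rw [ih]; ring

lemma foldl_range_SS (g : Nat → Int) (a : Int) (k : Nat) :
    (List.range k).foldl (fun s j => s + g j) a = a + SS g k := by
  induction k with
  | zero => simp [SS]
  | succ k ih => rw [List.range_succ, List.foldl_append, ih]; simp [SS]; ring

lemma getD_range_map {α : Type} (n k : Nat) (f : Nat → α) (d : α) :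
    ((List.range n).map f).getD k d = if k < n then f k else d := by
  by_cases h : k < n
  · simp [List.getD, List.getElem?_map, List.getElem?_range h, h]
  · have hnone : (List.range n)[k]? = none := by
      rw [List.getElem?_eq_none]; simpa using (by omega : n ≤ k)
    simp [List.getD, List.getElem?_map, hnone, h]

lemma col_getD (matrix : List (List Int)) (i j : Nat) :
    (matrix.map (fun r => r.getD j 0)).getD i 0 = (matrix.getD i []).getD j 0 := by
  by_cases h : i < matrix.length
  · simp [List.getD, List.getElem?_map, List.getElem?_eq_getElem h]
  · simp [List.getD, List.getElem?_map, List.getElem?_eq_none (by omega : matrix.length ≤ i)]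

lemma maskN_length (x y : List Int) (k : Nat) : (maskN x y k).length = y.length := by
  induction k with
  | zero => rfl
  | succ k ih => unfold maskN; split <;> simp [ih]

lemma maskN_getD_ge (x y : List Int) (k j : Nat) (h : k ≤ j) :
    (maskN x y k).getD j 0 = y.getD j 0 := by
  induction k with
  | zero => rfl
  | succ k ih =>
    unfold maskN; split
    · rw [List.getD, List.getElem?_set_ne (by omega), ← List.getD, ih (by omega)]
    · exact ih (by omega)

lemma maskN_getD_lt (x y : List Int) (k j : Nat) (h : j < k) :
    (maskN x y k).getD j 0 = if x.getD j 0 = 0 then 0 else y.getD j 0 := by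
  induction k with
  | zero => omega
  | succ k ih =>
    by_cases hjk : j < k
    · unfold maskN; split
      · rw [List.getD, List.getElem?_set_ne (by omega), ← List.getD, ih hjk]
      · exact ih hjk
    · have hj : j = k := by omega
      subst hj
      unfold maskN
      split
      · next hx =>
        by_cases hl : j < (maskN x y j).length
        · simp [List.getD, List.getElem?_set_self hl]
        · rw [List.set_eq_of_length_le (by omega), maskN_getD_ge x y j j le_rfl]
          have hy : y.length ≤ j := by rw [maskN_length] at hl; omega
          simp [List.getD, List.getElem?_eq_none hy]
      · next hx =>
        rw [maskN_getD_ge x y j j le_rfl]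

lemma rowA_getD (matrix : List (List Int)) (w : Nat) (i j : Nat) (hj : j < w) :
    (rowA matrix w i).getD j 0 = colRead (matrix.map (fun r => r.getD j 0)) i := by
  induction i with
  | zero => exact (col_getD matrix 0 j).symm
  | succ i ih =>
    show (maskN (rowA matrix w i) (matrix.getD (i+1) []) w).getD j 0 = _
    rw [maskN_getD_lt _ _ w j hj, ih]
    simp only [colRead]
    rw [col_getD]

lemma colRead_cons (v : Int) (rest : List Int) (i : Nat) :
    colRead (v :: rest) (i + 1) = if v = 0 then 0 else colRead rest i := by
  induction i with
  | zero => simp [colRead, List.getD]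
  | succ i ih =>
    show (if colRead (v :: rest) (i+1) = 0 then 0 else (v :: rest).getD (i+2) 0) = _
    rw [ih]
    by_cases hv : v = 0
    · simp [hv]
    · simp only [hv, if_neg, if_false]
      rfl

lemma SS_colRead (c : List Int) : SS (fun i => colRead c i) c.length = bSumCol c := by
  induction c with
  | nil => rfl
  | cons v rest ih =>
    rw [List.length_cons, SS_shift]
    have h0 : colRead (v :: rest) 0 = v := by simp [colRead, List.getD]
    rw [h0]
    by_cases hv : v = 0
    · have hz : SS (fun i => colRead (v :: rest) (i + 1)) rest.length = 0 := by
        rw [SS_congr _ (fun _ => 0) _ (fun i _ => by rw [colRead_cons]; simp [hv]), SS_zero]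
      rw [hz]
      simp [bSumCol, hv]
    · rw [SS_congr _ (fun i => colRead rest i) _ (fun i _ => by rw [colRead_cons]; simp [hv]), ih]
      simp [bSumCol, hv]

lemma matrix_eq_map (matrix : List (List Int)) :
    matrix = (List.range matrix.length).map (fun k => matrix.getD k []) := by
  apply List.ext_getElem
  · simp
  · intro i h1 h2
    simp [List.getD, List.getElem?_eq_getElem h1]

lemma set_range_map {α : Type} (n t : Nat) (f : Nat → α) (z : α) :
    ((List.range n).map f).set t z
      = (List.range n).map (fun k' => if k' = t then z else f k') := by
  apply List.ext_getElem
  · simp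
  · intro i h1 h2
    simp only [List.getElem_map, List.getElem_range] at h2 ⊢
    by_cases hi : i = t
    · subst hi
      simp [List.getElem_set_self]
    · rw [List.getElem_set_ne (fun h => hi h.symm)]
      simp [hi]

lemma inner_fold (matrix : List (List Int)) (n w i : Nat)
    (hn : n = matrix.length) (hi : i < n) (s : Int) :
    ∀ k, k ≤ w →
      (List.range k).foldl (aInner n i) (MM matrix w n i, s)
        = (Mpart matrix w n i k, s + SS (fun j => (rowA matrix w i).getD j 0) k) := by
  intro k hk
  induction k with
  | zero =>
    simp only [List.range_zero, List.foldl_nil, SS, add_zero]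
    simp only [Prod.mk.injEq]
    refine ⟨?_, ?_⟩
    · unfold MM Mpart
      exact List.map_congr_left (fun a ha => by
        simp only [List.mem_range] at ha
        split_ifs with h1 h2
        · rfl
        · subst h2; rfl
        · rfl)
    · trivial
  | succ k ihk =>
    rw [List.range_succ, List.foldl_append, ihk (by omega)]
    simp only [List.foldl_cons, List.foldl_nil]
    have hread : ((Mpart matrix w n i k).getD i []) = rowA matrix w i := by
      unfold Mpart
      rw [getD_range_map]
      simp [hi]
    have hv : ((Mpart matrix w n i k).getD i []).getD k 0 = (rowA matrix w i).getD k 0 := by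
      rw [hread]
    unfold aInner
    simp only [hv, Prod.mk.injEq]
    refine ⟨?_, ?_⟩
    · -- matrix component
      by_cases hcond : (rowA matrix w i).getD k 0 = 0 ∧ i + 1 < n
      · rw [if_pos hcond]
        have hr2 : (Mpart matrix w n i k).getD (i+1) []
            = maskN (rowA matrix w i) (matrix.getD (i+1) []) k := by
          unfold Mpart
          rw [getD_range_map]
          simp [hcond.2, (by omega : ¬ (i + 1 ≤ i))]
        rw [hr2]
        have hmask : maskN (rowA matrix w i) (matrix.getD (i+1) []) (k+1)
            = (maskN (rowA matrix w i) (matrix.getD (i+1) []) k).set k 0 := by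
          conv_lhs => rw [maskN]
          rw [if_pos hcond.1]
        rw [← hmask]
        unfold Mpart
        rw [set_range_map]
        exact List.map_congr_left (fun a ha => by
          simp only [List.mem_range] at ha
          split_ifs with h1 h2 h3 <;> first | rfl | omega)
      · rw [if_neg hcond]
        unfold Mpart
        exact List.map_congr_left (fun a ha => by
          simp only [List.mem_range] at ha
          split_ifs with h1 h2 <;> try rfl
          subst h2
          rcases (not_and_or.mp hcond) with hx | hx
          · conv_rhs => rw [maskN]
            rw [if_neg hx]
          · omega)
    · -- sum component
      simp [SS, add_assoc]

lemma outer_fold (matrix : List (List Int)) (n w : Nat)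
    (hn : n = matrix.length) :
    ∀ i, i ≤ n →
      (List.range i).foldl (aOuter n w) (matrix, 0)
        = (MM matrix w n i, SS (fun i' => SS (fun j => (rowA matrix w i').getD j 0) w) i) := by
  intro i hi
  induction i with
  | zero =>
    simp only [List.range_zero, List.foldl_nil, SS]
    simp only [Prod.mk.injEq]
    refine ⟨?_, ?_⟩
    · unfold MM
      conv_lhs => rw [matrix_eq_map matrix]
      rw [← hn]
      exact List.map_congr_left (fun a ha => by
        simp only [List.mem_range] at ha
        split_ifs with h1
        · have : a = 0 := by omega
          subst this; simp [rowA]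
        · rfl)
    · trivial
  | succ i ihk =>
    rw [List.range_succ, List.foldl_append, ihk (by omega)]
    simp only [List.foldl_cons, List.foldl_nil]
    unfold aOuter
    rw [inner_fold matrix n w i hn (by omega) _ w le_rfl]
    simp only [Prod.mk.injEq]
    refine ⟨?_, ?_⟩
    · unfold Mpart MM
      exact List.map_congr_left (fun a ha => by
        simp only [List.mem_range] at ha
        by_cases h1 : a ≤ i
        · rw [if_pos h1, if_pos (by omega : a ≤ i + 1)]
        · by_cases h2 : a = i + 1
          · subst h2
            rw [if_neg h1, if_pos rfl, if_pos (le_refl (i + 1))]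
            rfl
          · rw [if_neg h1, if_neg h2, if_neg (by omega : ¬ a ≤ i + 1)])
    · simp [SS]

lemma A_closed (matrix : List (List Int)) :
    matrixElementsSum matrix
      = SS (fun i => SS (fun j => (rowA matrix (matrix.headD []).length i).getD j 0)
            (matrix.headD []).length) matrix.length := by
  unfold matrixElementsSum
  rw [outer_fold matrix matrix.length (matrix.headD []).length rfl matrix.length le_rfl]

lemma foldl_min_const (rest : List (List Int)) (a : Nat)
    (h : ∀ r ∈ rest, a ≤ r.length) :
    rest.foldl (fun acc r => min acc r.length) a = a := by
  induction rest with
  | nil => rfl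
  | cons r rest ih =>
    simp only [List.foldl_cons]
    rw [min_eq_left (h r (by simp))]
    exact ih (fun r' hr' => h r' (by simp [hr']))

lemma B_closed (matrix : List (List Int)) (hPre : Pre_matrixElementsSum matrix) :
    matrixElementsSum_alt matrix
      = SS (fun j => bSumCol (matrix.map (fun r => r.getD j 0))) (matrix.headD []).length := by
  unfold matrixElementsSum_alt bCols
  cases matrix with
  | nil => simp [SS]
  | cons r0 rest =>
    simp only
    have hmin : rest.foldl (fun acc r => min acc r.length) r0.length = r0.length := by
      apply foldl_min_const
      intro r hr
      have := hPre r (by simp [hr])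
      simpa using this
    rw [hmin, List.foldl_map, foldl_range_SS]
    simp [List.headD]

-- ===== VERDICT (by name: the statement is the Claim_ definition above) =====
theorem matrixElementsSum_spec : Claim_equal_matrixElementsSum := by
  intro matrix _ hPre
  unfold Spec_matrixElementsSum
  rw [A_closed, B_closed matrix hPre]
  rw [SS_swap (fun i j => (rowA matrix (matrix.headD []).length i).getD j 0)
        matrix.length (matrix.headD []).length]
  apply SS_congr
  intro j hj
  rw [SS_congr _ (fun i => colRead (matrix.map (fun r => r.getD j 0)) i) _
        (fun i _ => rowA_getD matrix _ i j hj)]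
  have hlen : (matrix.map (fun r => r.getD j 0)).length = matrix.length := by simp
  rw [← hlen, SS_colRead]
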